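-- pv_equiv track=rewrite | github.com/maplesyrupman/mini_practices | count-growlers.py | count_growlers
-- ===== SOURCE A (Python) =====
-- def count_growlers(animals):
--
--     Rdog= 0
--     Rcat= 0
--     Ldog= 0
--     Lcat= 0
--     growlers= 0
--
--     for animal in animals:
--         if Rdog > Rcat and (animal == 'cat' or animal == 'dog'):
--             growlers += 1
--         if animal == 'dog' or animal == 'god':
--             Rdog += 1
--         else:
--             Rcat += 1
--
--     for animal in animals[::-1]:
--         if Ldog > Lcat and (animal == 'tac' or animal == 'god'):
--             growlers += 1
--         if animal == 'dog' or animal == 'god':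
--             Ldog += 1
--         else:
--             Lcat += 1
--
--     return growlers
-- ===== SOURCE B (Python) =====
-- def count_growlers(animals):
--     total_dogs = sum(1 for a in animals if a == 'dog' or a == 'god')
--     total_cats = len(animals) - total_dogs
--     left_dog = 0
--     left_cat = 0
--     growlers = 0
--     for a in animals:
--         is_dog = a == 'dog' or a == 'god'
--         right_dog = total_dogs - left_dog - (1 if is_dog else 0)
--         right_cat = total_cats - left_cat - (0 if is_dog else 1)
--         if left_dog > left_cat and (a == 'cat' or a == 'dog'):
--             growlers += 1
--         if right_dog > right_cat and (a == 'tac' or a == 'god'):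
--             growlers += 1
--         if is_dog:
--             left_dog += 1
--         else:
--             left_cat += 1
--     return growlers
-- ===== Notes on version B (the rewrite author's own statement) =====
-- stated objective: alternative
-- what changed: A makes two passes (forward, then over the reversed list) each maintaining its own dog/cat counters; B precomputes the totals once and makes a single forward pass, deriving the right-side counts for each animal as total minus left-side counts minus the animal itself.
import Mathlib
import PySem

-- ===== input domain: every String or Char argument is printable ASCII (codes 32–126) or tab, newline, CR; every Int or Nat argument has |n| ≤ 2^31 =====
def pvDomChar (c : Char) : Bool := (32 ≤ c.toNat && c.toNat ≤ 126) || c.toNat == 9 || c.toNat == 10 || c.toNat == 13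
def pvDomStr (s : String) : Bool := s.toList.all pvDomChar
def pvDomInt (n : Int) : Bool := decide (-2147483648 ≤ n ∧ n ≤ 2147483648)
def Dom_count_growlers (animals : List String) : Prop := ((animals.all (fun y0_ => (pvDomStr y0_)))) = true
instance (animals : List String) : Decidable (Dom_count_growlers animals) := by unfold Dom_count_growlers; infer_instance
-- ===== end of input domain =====

-- B replaces A's two passes (forward + over the reversed list) by one forward pass
-- using precomputed totals; objective: alternative decomposition, same O(n) cost.

-- ===== PORT A =====
-- one step of A's first loop; state = (Rdog, Rcat, growlers)
def cgStep1 (s : Int × Int × Int) (a : String) : Int × Int × Int :=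
  let g := if s.1 > s.2.1 ∧ (a = "cat" ∨ a = "dog") then s.2.2 + 1 else s.2.2
  if a = "dog" ∨ a = "god" then (s.1 + 1, s.2.1, g) else (s.1, s.2.1 + 1, g)

-- one step of A's second loop; state = (Ldog, Lcat, growlers)
def cgStep2 (s : Int × Int × Int) (a : String) : Int × Int × Int :=
  let g := if s.1 > s.2.1 ∧ (a = "tac" ∨ a = "god") then s.2.2 + 1 else s.2.2
  if a = "dog" ∨ a = "god" then (s.1 + 1, s.2.1, g) else (s.1, s.2.1 + 1, g)

def count_growlers (animals : List String) : Int :=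
  let s1 := animals.foldl cgStep1 (0, 0, 0)
  -- animals[::-1] = animals.reverse (PySem.List.slice?_none_none_neg_one)
  let s2 := animals.reverse.foldl cgStep2 (0, 0, s1.2.2)
  s2.2.2

-- ===== PORT B =====
-- one step of B's single loop; state = (left_dog, left_cat, growlers)
def cgStepB (totD totC : Int) (s : Int × Int × Int) (a : String) : Int × Int × Int :=
  let rd := totD - s.1 - (if a = "dog" ∨ a = "god" then 1 else 0)
  let rc := totC - s.2.1 - (if a = "dog" ∨ a = "god" then 0 else 1)
  let g := if s.1 > s.2.1 ∧ (a = "cat" ∨ a = "dog") then s.2.2 + 1 else s.2.2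
  let g := if rd > rc ∧ (a = "tac" ∨ a = "god") then g + 1 else g
  if a = "dog" ∨ a = "god" then (s.1 + 1, s.2.1, g) else (s.1, s.2.1 + 1, g)

def count_growlers_alt (animals : List String) : Int :=
  let totalDogs := animals.foldl (fun n a => if a = "dog" ∨ a = "god" then n + 1 else n) (0 : Int)
  let totalCats := (animals.length : Int) - totalDogs
  (animals.foldl (cgStepB totalDogs totalCats) (0, 0, 0)).2.2

-- ===== PRECONDITION & SPEC =====
def Spec_count_growlers (animals : List String) (out : Int) : Prop := out = count_growlers_alt animals
instance (animals : List String) (out : Int) : Decidable (Spec_count_growlers animals out) := by unfold Spec_count_growlers; infer_instance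

-- ===== CLAIM (what is proved, stated in full; the proofs are below) =====
def Claim_equal_count_growlers : Prop := ∀ (animals : List String), Dom_count_growlers animals → Spec_count_growlers animals (count_growlers animals)

-- ===== LEMMAS AND PROOFS =====

-- number of 'dog'/'god' and of everything else in a list
def cgDogs : List String → Int
  | [] => 0
  | a :: t => (if a = "dog" ∨ a = "god" then 1 else 0) + cgDogs t

def cgCats : List String → Int
  | [] => 0
  | a :: t => (if a = "dog" ∨ a = "god" then 0 else 1) + cgCats t

-- growlers contributed by A's second pass (right-looking animals), suffix-recursive
def cgR : List String → Int
  | [] => 0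
  | a :: t => cgR t + (if cgDogs t > cgCats t ∧ (a = "tac" ∨ a = "god") then 1 else 0)

lemma cgDogs_add_cgCats (xs : List String) : cgDogs xs + cgCats xs = (xs.length : Int) := by
  induction xs with
  | nil => simp [cgDogs, cgCats]
  | cons a t ih => simp [cgDogs, cgCats]; split_ifs <;> omega

lemma totalDogs_eq (xs : List String) (n : Int) :
    xs.foldl (fun n a => if a = "dog" ∨ a = "god" then n + 1 else n) n = n + cgDogs xs := by
  induction xs generalizing n with
  | nil => simp [cgDogs]
  | cons a t ih => simp only [List.foldl_cons, cgDogs, ih]; split_ifs <;> ring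

lemma pass2_foldr (xs : List String) (g0 : Int) :
    xs.foldr (fun a s => cgStep2 s a) (0, 0, g0) = (cgDogs xs, cgCats xs, g0 + cgR xs) := by
  induction xs with
  | nil => simp [cgDogs, cgCats, cgR]
  | cons a t ih =>
    rw [List.foldr_cons, ih]
    by_cases hdog : a = "dog" ∨ a = "god" <;>
      by_cases hr : cgDogs t > cgCats t ∧ (a = "tac" ∨ a = "god") <;>
        simp [cgStep2, cgDogs, cgCats, cgR, hdog, hr, Prod.ext_iff] <;>
          omega

lemma pass1_g_add (xs : List String) (d c g k : Int) :
    (xs.foldl cgStep1 (d, c, g + k)).2.2 = (xs.foldl cgStep1 (d, c, g)).2.2 + k := by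
  induction xs generalizing d c g with
  | nil => simp
  | cons a t ih =>
    simp only [List.foldl_cons, cgStep1]
    split_ifs <;>
      first
        | rw [show g + k + 1 = (g + 1) + k by ring, ih]
        | rw [ih]

lemma main_lemma (xs : List String) (d c g totD totC : Int)
    (hD : totD = d + cgDogs xs) (hC : totC = c + cgCats xs) :
    (xs.foldl (cgStepB totD totC) (d, c, g)).2.2
      = (xs.foldl cgStep1 (d, c, g)).2.2 + cgR xs := by
  induction xs generalizing d c g with
  | nil => simp [cgR]
  | cons a t ih =>
    simp only [cgDogs, cgCats] at hD hC
    simp only [List.foldl_cons, cgStepB, cgStep1, cgR]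
    by_cases hdog : a = "dog" ∨ a = "god"
    · simp only [if_pos hdog] at hD hC ⊢
      have hd' : totD - d - 1 = cgDogs t := by omega
      have hc' : totC - c - 0 = cgCats t := by omega
      rw [hd', hc']
      by_cases hr : cgDogs t > cgCats t ∧ (a = "tac" ∨ a = "god")
      · simp only [if_pos hr]
        rw [ih (d + 1) c _ (by omega) (by omega), pass1_g_add]
        ring
      · simp only [if_neg hr]
        rw [ih (d + 1) c _ (by omega) (by omega)]
        ring
    · simp only [if_neg hdog] at hD hC ⊢
      have hd' : totD - d - 0 = cgDogs t := by omega
      have hc' : totC - c - 1 = cgCats t := by omega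
      rw [hd', hc']
      by_cases hr : cgDogs t > cgCats t ∧ (a = "tac" ∨ a = "god")
      · simp only [if_pos hr]
        rw [ih d (c + 1) _ (by omega) (by omega), pass1_g_add]
        ring
      · simp only [if_neg hr]
        rw [ih d (c + 1) _ (by omega) (by omega)]
        ring

-- ===== VERDICT (by name: the statement is the Claim_ definition above) =====
theorem count_growlers_spec : Claim_equal_count_growlers := by
  intro animals _
  unfold Spec_count_growlers count_growlers count_growlers_alt
  simp only [List.foldl_reverse]
  rw [totalDogs_eq]
  have hC : (animals.length : Int) - (0 + cgDogs animals) = 0 + cgCats animals := by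
    have := cgDogs_add_cgCats animals; omega
  rw [hC]
  rw [main_lemma animals 0 0 0 _ _ rfl rfl]
  rw [pass2_foldr animals (animals.foldl cgStep1 (0, 0, 0)).2.2]
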